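-- pv_equiv track=rewrite | github.com/sungminoh/algorithms | leetcode/solved/973_Stamping_The_Sequence/solution.py | decode
-- ===== SOURCE A (Python) =====
-- def decode(stamp, stamp_orders):
--     if not stamp_orders:
--         return ''
--     stamp = list(stamp)
--     ret = ['_'] * (max(stamp_orders) + len(stamp))
--     for i in stamp_orders:
--         ret[i:i+len(stamp)] = stamp
--     return ''.join(ret)
-- ===== SOURCE B (Python) =====
-- def decode(stamp, stamp_orders):
--     if not stamp_orders:
--         return ''
--     m = len(stamp)
--     n = max(stamp_orders) + m
--     rev = stamp_orders[::-1]
--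
--     def cell(p):
--         for i in rev:
--             if i <= p < i + m:
--                 return stamp[p - i]
--         return '_'
--
--     return ''.join(map(cell, range(n)))
-- ===== Notes on version B (the rewrite author's own statement) =====
-- stated objective: alternative
-- what changed: A mutates a buffer by repeated slice assignment (later stamps overwrite earlier ones); B never mutates: for each output cell it scans the stamp positions in reverse and returns the first stamp covering it, turning last-write-wins into a first-match lookup. Pre_ excludes negative stamp positions with a nonempty stamp, where A's slice assignment wraps the write to the end of the buffer (and can lengthen it) - an artefact of Python list slicing that no specified fill would reproduce.
-- outside the precondition, e.g. on decode('ab', [-1]): A returns 'ab', B returns 'b'; on decode('ab', [5, -2]): A returns '_____abab', B returns '_____ab'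
import Mathlib
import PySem

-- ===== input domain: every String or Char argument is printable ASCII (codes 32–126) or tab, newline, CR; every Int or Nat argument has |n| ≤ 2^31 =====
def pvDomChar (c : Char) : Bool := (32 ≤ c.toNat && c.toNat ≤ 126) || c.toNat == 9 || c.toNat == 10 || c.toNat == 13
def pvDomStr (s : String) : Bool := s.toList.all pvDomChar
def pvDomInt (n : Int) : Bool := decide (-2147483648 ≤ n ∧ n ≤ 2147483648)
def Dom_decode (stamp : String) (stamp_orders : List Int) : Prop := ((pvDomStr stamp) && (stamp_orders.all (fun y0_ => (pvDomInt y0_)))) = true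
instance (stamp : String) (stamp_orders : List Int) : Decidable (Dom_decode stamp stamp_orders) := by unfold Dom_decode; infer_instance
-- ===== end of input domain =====

-- B replaces A's per-stamp slice-assignment writes by a per-cell reverse scan for the first
-- covering stamp (alternative algorithm, no mutation; same return value on Pre_).

-- ===== PORT A =====
-- ret[i:i+len(stamp)] = stamp  (Python list slice assignment; indices resolved like a slice,
-- stop clamped below by start — exact transliteration of CPython's setslice)
def pySetSlice (r : List Char) (i : Int) (s : List Char) : List Char :=
  let a := PySem.List.clampIdx r.length i
  let b := max a (PySem.List.clampIdx r.length (i + (s.length : Int)))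
  r.take a ++ s ++ r.drop b

def decode (stamp : String) (stamp_orders : List Int) : String :=
  if stamp_orders = [] then "" else
    let s := stamp.toList
    let n := ((PySem.List.max? stamp_orders (fun x => x)).getD 0 + (s.length : Int)).toNat
    String.ofList (stamp_orders.foldl (fun r i => pySetSlice r i s) (List.replicate n '_'))

-- ===== PORT B =====
-- cell(p): first stamp position in the reversed order list covering p
def pvCell (s : List Char) (rev : List Int) (p : Int) : Char :=
  match rev with
  | [] => '_'
  | i :: t =>
    if i ≤ p ∧ p < i + (s.length : Int) then (PySem.List.pyGet? s (p - i)).getD '_'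
    else pvCell s t p

def decode_alt (stamp : String) (stamp_orders : List Int) : String :=
  if stamp_orders = [] then "" else
    let s := stamp.toList
    let nI := (PySem.List.max? stamp_orders (fun x => x)).getD 0 + (s.length : Int)
    String.ofList ((List.range nI.toNat).map (fun p : Nat => pvCell s stamp_orders.reverse (p : Int)))

-- ===== PRECONDITION & SPEC =====
-- Pre_ excludes negative stamp positions with a nonempty stamp: there A's slice assignment
-- wraps the write to the end of the buffer (and can even lengthen it), an artefact of
-- Python list slicing that no specified fill would reproduce.
def Pre_decode (stamp : String) (stamp_orders : List Int) : Prop :=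
  stamp.toList = [] ∨ ∀ i ∈ stamp_orders, 0 ≤ i
instance (stamp : String) (stamp_orders : List Int) : Decidable (Pre_decode stamp stamp_orders) := by unfold Pre_decode; infer_instance

def pvWitness_decode : String × List Int := ("ab", [0, 3])

def Spec_decode (stamp : String) (stamp_orders : List Int) (out : String) : Prop := out = decode_alt stamp stamp_orders
instance (stamp : String) (stamp_orders : List Int) (out : String) : Decidable (Spec_decode stamp stamp_orders out) := by unfold Spec_decode; infer_instance

-- ===== CLAIM (what is proved, stated in full; the proofs are below) =====
def Claim_equal_decode : Prop := ∀ (stamp : String) (stamp_orders : List Int), Dom_decode stamp stamp_orders → Pre_decode stamp stamp_orders → Spec_decode stamp stamp_orders (decode stamp stamp_orders)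

-- ===== LEMMAS AND PROOFS =====

theorem pvCell_nil_stamp (rev : List Int) (p : Int) :
    pvCell [] rev p = '_' := by
  induction rev with
  | nil => rfl
  | cons i t ih =>
      simp only [pvCell, List.length_nil, Int.natCast_zero, add_zero]
      rw [if_neg (by omega)]
      exact ih

theorem clampIdx_of_nonneg (n : Nat) (i : Int) (h0 : 0 ≤ i) (h : i ≤ (n : Int)) :
    PySem.List.clampIdx n i = i.toNat := by
  simp only [PySem.List.clampIdx]
  split_ifs <;> omega

theorem setSlice_nil (r : List Char) (i : Int) : pySetSlice r i [] = r := by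
  simp [pySetSlice]

theorem foldl_setSlice_nil (l : List Int) (r : List Char) :
    l.foldl (fun r i => pySetSlice r i ([] : List Char)) r = r := by
  induction l generalizing r with
  | nil => rfl
  | cons a t ih =>
      rw [List.foldl_cons, setSlice_nil]
      exact ih r

-- splicing s into a mapped range at [e, e+m) is a pointwise update
theorem splice_map (n e : Nat) (s : List Char) (f : Nat → Char)
    (hb : e + s.length ≤ n) :
    ((List.range n).map f).take e ++ s ++ ((List.range n).map f).drop (e + s.length)
      = (List.range n).map (fun p => if e ≤ p ∧ p < e + s.length then s.getD (p - e) '_' else f p) := by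
  apply List.ext_getElem
  · simp only [List.length_append, List.length_take, List.length_drop, List.length_map,
      List.length_range]
    omega
  · intro k h1 h2
    by_cases hk1 : k < e
    · rw [List.getElem_append_left (by simp; omega)]
      rw [List.getElem_append_left (by simp; omega)]
      simp only [List.getElem_take, List.getElem_map, List.getElem_range]
      rw [if_neg (by omega)]
    · by_cases hk2 : k < e + s.length
      · rw [List.getElem_append_left (by simp; omega)]
        rw [List.getElem_append_right (by simp; omega)]
        simp only [List.getElem_map, List.getElem_range]
        have : (e ≤ k ∧ k < e + s.length) := by omega
        rw [if_pos this]
        have hlen : (((List.range n).map f).take e).length = e := by simp; omega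
        rw [List.getD_eq_getElem s '_' (by omega)]
        congr 1
        omega
      · rw [List.getElem_append_right (by simp; omega)]
        have hlen : (((List.range n).map f).take e ++ s).length = e + s.length := by
          simp
          omega
        simp only [hlen]
        rw [List.getElem_drop]
        simp only [List.getElem_map, List.getElem_range]
        have hnc : ¬ (e ≤ k ∧ k < e + s.length) := by omega
        rw [if_neg hnc]
        congr 1
        omega

-- one slice-assignment step equals the pointwise first-cover update
theorem step_eq (s : List Char) (nI : Int) (i : Int) (g : Nat → Char)
    (hi : 0 ≤ i ∧ i + (s.length : Int) ≤ nI) :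
    pySetSlice ((List.range nI.toNat).map g) i s
      = (List.range nI.toNat).map (fun p : Nat =>
          if i ≤ (p : Int) ∧ (p : Int) < i + (s.length : Int)
          then (PySem.List.pyGet? s ((p : Int) - i)).getD '_' else g p) := by
  obtain ⟨h0, h1⟩ := hi
  have hlen : ((List.range nI.toNat).map g).length = nI.toNat := by simp
  set n : Nat := nI.toNat with hn'
  have hcast : i.toNat + s.length ≤ n := by omega
  simp only [pySetSlice, hlen]
  rw [clampIdx_of_nonneg n i h0 (by omega),
      clampIdx_of_nonneg n (i + (s.length : Int)) (by omega) (by omega)]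
  have hst2 : max i.toNat (i + (s.length : Int)).toNat = i.toNat + s.length := by omega
  rw [hst2, splice_map n i.toNat s g hcast]
  apply List.map_congr_left
  intro p hp
  by_cases hc : i.toNat ≤ p ∧ p < i.toNat + s.length
  · obtain ⟨hc1, hc2⟩ := hc
    rw [if_pos ⟨hc1, hc2⟩]
    rw [if_pos (⟨by omega, by omega⟩ : _ ∧ _)]
    have hix : (p : Int) - i = ((p - i.toNat : Nat) : Int) := by omega
    rw [hix, PySem.List.pyGet?_natCast]
    rw [List.getElem?_eq_getElem (by omega)]
    rw [List.getD_eq_getElem s '_' (by omega)]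
    rfl
  · rw [if_neg hc]
    rw [if_neg (by omega)]

-- the main invariant: the forward overwrite fold equals the reverse first-cover map
theorem fold_eq_map (s : List Char) (nI : Int) (l : List Int)
    (h : ∀ i ∈ l, 0 ≤ i ∧ i + (s.length : Int) ≤ nI) :
    l.foldl (fun r i => pySetSlice r i s) (List.replicate nI.toNat '_')
      = (List.range nI.toNat).map (fun p : Nat => pvCell s l.reverse (p : Int)) := by
  induction l using List.reverseRecOn with
  | nil =>
      simp [pvCell]
  | append_singleton l i ih =>
      have hl : ∀ j ∈ l, 0 ≤ j ∧ j + (s.length : Int) ≤ nI := by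
        intro j hj; exact h j (by simp [hj])
      have hi := h i (by simp)
      rw [List.foldl_append, List.foldl_cons, List.foldl_nil, ih hl]
      rw [step_eq s nI i _ hi]
      rw [List.reverse_append]
      simp only [List.reverse_cons, List.reverse_nil, List.nil_append, List.cons_append]
      apply List.map_congr_left
      intro p _
      simp only [pvCell]

-- with a nonempty order list, Python's max(stamp_orders) and its properties
theorem max_props (l : List Int) (hne : l ≠ []) :
    ∃ mx, PySem.List.max? l (fun x => x) = some mx ∧ mx ∈ l ∧ ∀ y ∈ l, y ≤ mx := by
  cases hmx : PySem.List.max? l (fun x => x) with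
  | none => exact absurd (((PySem.List.max?_eq_none_iff l (fun x => x)).mp hmx)) hne
  | some mx =>
      exact ⟨mx, rfl, PySem.List.max?_mem hmx, PySem.List.max?_isMax hmx⟩

theorem decode_eq (stamp : String) (stamp_orders : List Int)
    (hpre : Pre_decode stamp stamp_orders) :
    decode stamp stamp_orders = decode_alt stamp stamp_orders := by
  by_cases hne : stamp_orders = []
  · simp [decode, decode_alt, hne]
  · obtain ⟨mx, hmx, hmem, hmax⟩ := max_props stamp_orders hne
    simp only [decode, decode_alt, if_neg hne, hmx, Option.getD_some]
    rcases hpre with hempty | hnn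
    · -- empty stamp: every slice assignment is a no-op and every cell stays '_'
      rw [hempty]
      rw [foldl_setSlice_nil]
      congr 1
      have hc : ∀ p : Nat, pvCell [] stamp_orders.reverse (p : Int) = '_' :=
        fun p => pvCell_nil_stamp _ _
      simp only [hc]
      simp
    · -- all writes stay inside the buffer
      congr 1
      apply fold_eq_map stamp.toList (mx + (stamp.toList.length : Int))
      intro i hi
      exact ⟨hnn i hi, by have := hmax i hi; omega⟩

-- ===== VERDICT (by name: the statement is the Claim_ definition above) =====
theorem decode_spec : Claim_equal_decode := by
  intro stamp stamp_orders _ hpre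
  unfold Spec_decode
  exact decode_eq stamp stamp_orders hpre
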